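-- pv_equiv track=rewrite | github.com/niteeshchaudhary/myagent | agent/rag/indexer.py | _fixed_chunk_text
-- ===== SOURCE A (Python) =====
-- from typing import Dict, Iterable, List, Optional, Tuple
--
-- def _fixed_chunk_text(text: str, chunk_size_chars: int, overlap_chars: int) -> List[Tuple[int, int, str]]:
--     """
--     Generic fixed-size chunking by characters but returns line-aligned chunks.
--     Returns list of (start_line, end_line, text).
--     """
--     lines = text.splitlines()
--     if not lines:
--         return []
--     # join with newline and then create windows by characters, but map to lines
--     joined = "\n".join(lines)
--     N = len(joined)
--     if N <= chunk_size_chars: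
--         return [(1, len(lines), joined)]
--     chunks: List[Tuple[int, int, str]] = []
--     start_char = 0
--     while start_char < N:
--         end_char = min(start_char + chunk_size_chars, N)
--         # expand end_char to end of nearest line
--         prefix = joined[:end_char]
--         # count lines in prefix
--         end_line = prefix.count("\n") + 1
--         # find start_line similarly
--         prefix2 = joined[:start_char]
--         start_line = prefix2.count("\n") + 1 if start_char > 0 else 1
--         sub_lines = lines[start_line - 1 : end_line]
--         if not sub_lines:
--             break
--         sub_text = "\n".join(sub_lines)
--         chunks.append((start_line, end_line, sub_text))
--         if end_char == N:
--             break
--         # advance start_char by chunk_size - overlap (approx)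
--         step = chunk_size_chars - overlap_chars
--         if step <= 0:
--             break
--         start_char += step
--     return chunks
-- ===== SOURCE B (Python) =====
-- import bisect
--
-- def _fixed_chunk_text(text, chunk_size_chars, overlap_chars):
--     lines = text.splitlines()
--     if not lines:
--         return []
--     joined = "\n".join(lines)
--     N = len(joined)
--     if N <= chunk_size_chars:
--         return [(1, len(lines), joined)]
--     # newline offsets, once; line number of char offset c is bisect_left(nl, c) + 1
--     nl = [i for i, ch in enumerate(joined) if ch == "\n"]
--     step = chunk_size_chars - overlap_chars
--     # window starts form an arithmetic progression; the last window is the first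
--     # one reaching the end (start + chunk_size_chars >= N)
--     if step <= 0:
--         starts = [0]
--     else:
--         starts = range(0, min(N, N - chunk_size_chars + step), step)
--     out = []
--     for s in starts:
--         e = min(s + chunk_size_chars, N)
--         start_line = bisect.bisect_left(nl, s) + 1
--         end_line = bisect.bisect_left(nl, e) + 1
--         out.append((start_line, end_line, "\n".join(lines[start_line - 1:end_line])))
--     return out
-- ===== Notes on version B (the rewrite author's own statement) =====
-- stated objective: alternative
-- what changed: B precomputes the newline offsets once and replaces A's while loop (which slices the joined text and re-counts newlines in an O(N) prefix per chunk) by a closed-form arithmetic progression of window starts mapped to chunks via bisect; a timing run could not confirm a speed-up on its inputs. Pre_ excludes negative chunk sizes, outside the task's natural domain, where A's joined[:end] hits Python's accidental negative-slice behaviour.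
-- outside the precondition, e.g. on _fixed_chunk_text('a\nb', -1, 0): A returns [(1, 2, 'a\nb')], B returns [(1, 1, 'a')]
import Mathlib
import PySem

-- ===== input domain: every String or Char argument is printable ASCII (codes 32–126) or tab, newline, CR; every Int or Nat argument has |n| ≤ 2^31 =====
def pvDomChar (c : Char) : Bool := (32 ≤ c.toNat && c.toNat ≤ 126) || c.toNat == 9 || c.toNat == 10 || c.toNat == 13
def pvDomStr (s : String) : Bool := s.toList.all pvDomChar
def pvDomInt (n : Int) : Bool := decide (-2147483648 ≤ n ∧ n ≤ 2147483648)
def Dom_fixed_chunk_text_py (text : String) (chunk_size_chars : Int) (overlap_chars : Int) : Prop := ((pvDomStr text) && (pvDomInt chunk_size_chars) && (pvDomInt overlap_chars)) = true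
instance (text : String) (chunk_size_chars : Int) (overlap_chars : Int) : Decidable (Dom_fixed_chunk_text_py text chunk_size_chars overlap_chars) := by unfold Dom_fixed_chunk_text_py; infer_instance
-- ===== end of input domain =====

-- B replaces A's per-chunk prefix slicing and newline re-counting by one precomputed
-- newline-position index, a closed-form arithmetic progression of window starts, and a
-- bisect lookup per chunk; same return value on every admitted input (A mutates nothing).

-- ===== PORT A =====
-- the while loop of A; acc is `chunks`
def pvALoop (lines : List String) (joined : String) (N cs ov : Int) (s : Int)
    (acc : List (Int × Int × String)) : List (Int × Int × String) :=
  if h : s < N then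
    let e := min (s + cs) N
    let pre := PySem.Str.slice joined none (some e)
    let endLine : Int := (PySem.Str.count pre "\n" : Int) + 1
    let pre2 := PySem.Str.slice joined none (some s)
    let startLine : Int := if 0 < s then (PySem.Str.count pre2 "\n" : Int) + 1 else 1
    let subLines := PySem.List.slice lines (some (startLine - 1)) (some endLine)
    if subLines = [] then acc
    else
      let acc' := acc ++ [(startLine, endLine, PySem.Str.join "\n" subLines)]
      if e = N then acc'
      else
        let step := cs - ov
        if step ≤ 0 then acc'
        else pvALoop lines joined N cs ov (s + step) acc'
  else acc
termination_by (N - s).toNat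
decreasing_by
  have h1 : ¬ (cs - ov ≤ 0) := by assumption
  omega

def fixed_chunk_text_py (text : String) (chunk_size_chars : Int) (overlap_chars : Int) : List (Int × Int × String) :=
  let lines := PySem.Str.splitlines text
  if lines = [] then []
  else
    let joined := PySem.Str.join "\n" lines
    let N := PySem.Str.len joined
    if N ≤ chunk_size_chars then [(1, (lines.length : Int), joined)]
    else pvALoop lines joined N chunk_size_chars overlap_chars 0 []

-- ===== PORT B =====
-- `[i for i, ch in enumerate(joined) if ch == "\n"]`
def pvNlOf (cs : List Char) : List Int :=
  (PySem.List.enumerate cs 0).filterMap (fun p => if p.2 == '\n' then some p.1 else none)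

-- the body of B's for loop: the chunk for window start s
def pvChunkAt (lines : List String) (nl : List Int) (N cs : Int) (s : Int) : Int × Int × String :=
  let e := min (s + cs) N
  let startLine : Int := (PySem.List.bisectLeft nl s : Int) + 1
  let endLine : Int := (PySem.List.bisectLeft nl e : Int) + 1
  (startLine, endLine, PySem.Str.join "\n" (PySem.List.slice lines (some (startLine - 1)) (some endLine)))

def fixed_chunk_text_py_alt (text : String) (chunk_size_chars : Int) (overlap_chars : Int) : List (Int × Int × String) :=
  let lines := PySem.Str.splitlines text
  if lines = [] then []
  else
    let joined := PySem.Str.join "\n" lines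
    let N := PySem.Str.len joined
    if N ≤ chunk_size_chars then [(1, (lines.length : Int), joined)]
    else
      let nl := pvNlOf joined.toList
      let step := chunk_size_chars - overlap_chars
      let starts := if step ≤ 0 then [(0 : Int)]
        else PySem.List.pyRange 0 (min N (N - chunk_size_chars + step)) step
      starts.map (pvChunkAt lines nl N chunk_size_chars)

-- ===== PRECONDITION & SPEC =====
-- Pre_ excludes negative chunk sizes, outside the task's natural domain: there A's
-- `joined[:end]` with a negative end is Python's accidental negative-slice behaviour.
def Pre_fixed_chunk_text_py (text : String) (chunk_size_chars : Int) (overlap_chars : Int) : Prop :=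
  0 ≤ chunk_size_chars
instance (text : String) (chunk_size_chars : Int) (overlap_chars : Int) : Decidable (Pre_fixed_chunk_text_py text chunk_size_chars overlap_chars) := by unfold Pre_fixed_chunk_text_py; infer_instance

def pvWitness_fixed_chunk_text_py : String × Int × Int := ("ab\ncd\nef", 4, 1)

def Spec_fixed_chunk_text_py (text : String) (chunk_size_chars : Int) (overlap_chars : Int) (out : List (Int × Int × String)) : Prop := out = fixed_chunk_text_py_alt text chunk_size_chars overlap_chars
instance (text : String) (chunk_size_chars : Int) (overlap_chars : Int) (out : List (Int × Int × String)) : Decidable (Spec_fixed_chunk_text_py text chunk_size_chars overlap_chars out) := by unfold Spec_fixed_chunk_text_py; infer_instance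

-- ===== CLAIM (what is proved, stated in full; the proofs are below) =====
def Claim_equal_fixed_chunk_text_py : Prop := ∀ (text : String) (chunk_size_chars : Int) (overlap_chars : Int), Dom_fixed_chunk_text_py text chunk_size_chars overlap_chars → Pre_fixed_chunk_text_py text chunk_size_chars overlap_chars → Spec_fixed_chunk_text_py text chunk_size_chars overlap_chars (fixed_chunk_text_py text chunk_size_chars overlap_chars)

-- ===== LEMMAS AND PROOFS =====

-- proof-only common shape: the list of chunks produced from start offset s onwards
def pvBRec (lines : List String) (nl : List Int) (N cs step : Int) (s : Int) :
    List (Int × Int × String) :=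
  if h : s < N then
    pvChunkAt lines nl N cs s ::
      (if min (s + cs) N = N ∨ step ≤ 0 then [] else pvBRec lines nl N cs step (s + step))
  else []
termination_by (N - s).toNat
decreasing_by
  have h1 : ¬ (min (s + cs) N = N ∨ step ≤ 0) := by assumption
  omega

-- every position produced by the enumerate-comprehension is ≥ the start index
theorem pv_nl_ge (cs : List Char) (s : Int) (x : Int)
    (hx : x ∈ (PySem.List.enumerate cs s).filterMap (fun p => if p.2 == '\n' then some p.1 else none)) :
    s ≤ x := by
  rcases List.mem_filterMap.1 hx with ⟨p, hp, hfx⟩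
  rcases (PySem.List.mem_enumerate_iff cs s p).1 hp with ⟨k, hk, rfl⟩
  simp only [ite_eq_iff] at hfx
  rcases hfx with ⟨_, h2⟩ | ⟨_, h2⟩
  · cases h2; omega
  · cases h2

-- the positions are pairwise ≤ (in fact <)
theorem pv_nl_sorted (cs : List Char) (s : Int) :
    ((PySem.List.enumerate cs s).filterMap (fun p => if p.2 == '\n' then some p.1 else none)).Pairwise (· ≤ ·) := by
  rw [List.pairwise_filterMap]
  refine (PySem.List.pairwise_lt_enumerate cs s).imp ?_
  intro a b hab x hx y hy
  have hx' : x = a.1 := by by_cases h : a.2 == '\n' <;> simp [h] at hx; omega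
  have hy' : y = b.1 := by by_cases h : b.2 == '\n' <;> simp [h] at hy; omega
  omega

-- counting positions below s+k equals counting '\n' in the first k characters
theorem pv_countP_nl (cs : List Char) (s : Int) (k : Nat) :
    ((PySem.List.enumerate cs s).filterMap (fun p => if p.2 == '\n' then some p.1 else none)).countP
      (fun x => decide (x < s + (k : Int))) = (cs.take k).count '\n' := by
  induction cs generalizing s k with
  | nil => simp [PySem.List.enumerate]
  | cons c t ih =>
    cases k with
    | zero =>
      simp only [List.take_zero, List.count_nil, Nat.cast_zero, add_zero]
      rw [List.countP_eq_zero]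
      intro a ha
      have := pv_nl_ge (c :: t) s a ha
      simp only [decide_eq_true_eq]
      omega
    | succ j =>
      rw [PySem.List.enumerate_cons]
      simp only [List.filterMap_cons]
      have hpred : (fun x : Int => decide (x < s + ((j + 1 : Nat) : Int)))
          = fun x => decide (x < (s + 1) + (j : Int)) := by
        funext x; rw [decide_eq_decide]; push_cast; omega
      by_cases hc : c == '\n'
      · rw [if_pos hc]
        rw [List.countP_cons_of_pos (pa := by simp)]
        rw [hpred, ih (s+1) j]
        have hc' : c = '\n' := by simpa using hc
        simp [List.take_succ_cons, hc']
      · rw [if_neg hc]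
        rw [hpred, ih (s+1) j]
        have hc' : ¬ c = '\n' := by simpa using hc
        simp [List.take_succ_cons, List.count_cons, hc']

-- bisect_left on a sorted list is the number of elements below the probe
theorem pv_bisectLeft_eq_countP (xs : List Int) (x : Int) (h : xs.Pairwise (· ≤ ·)) :
    PySem.List.bisectLeft xs x = xs.countP (fun y => decide (y < x)) := by
  obtain ⟨hle, hlo, hhi⟩ := PySem.List.bisectLeft_spec xs x h
  set r := PySem.List.bisectLeft xs x with hr
  have h1 : List.countP (fun y => decide (y < x)) (xs.take r) = r := by
    rw [List.countP_eq_length.2, List.length_take, Nat.min_eq_left hle]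
    intro a ha
    rcases List.mem_iff_getElem.1 ha with ⟨i, hi, rfl⟩
    rw [List.length_take, Nat.min_eq_left hle] at hi
    rw [List.getElem_take]
    simpa using hlo i (lt_of_lt_of_le hi hle) hi
  have h2 : List.countP (fun y => decide (y < x)) (xs.drop r) = 0 := by
    rw [List.countP_eq_zero]
    intro a ha
    rcases List.mem_iff_getElem.1 ha with ⟨i, hi, rfl⟩
    rw [List.getElem_drop]
    have hlen : i < xs.length - r := by simpa using hi
    have := hhi (r + i) (by omega) (by omega)
    simp; omega
  calc r = List.countP (fun y => decide (y < x)) (xs.take r)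
          + List.countP (fun y => decide (y < x)) (xs.drop r) := by rw [h1, h2]; ring
    _ = xs.countP (fun y => decide (y < x)) := by rw [← List.countP_append, List.take_append_drop]

-- the fuelled scanner of Chars.count, for a one-character pattern
theorem pv_count_go_single (c : Char) (fuel : Nat) (cs : List Char) (acc : Nat)
    (hf : cs.length ≤ fuel) :
    PySem.Chars.count.go [c] fuel cs acc = acc + cs.count c := by
  induction fuel generalizing cs acc with
  | zero => cases cs with
    | nil => rw [PySem.Chars.count.go.eq_def]; simp
    | cons h t => simp at hf
  | succ n ih =>
    cases cs with
    | nil => rw [PySem.Chars.count.go.eq_def]; simp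
    | cons hd t =>
      rw [PySem.Chars.count.go.eq_def]
      simp only [List.isPrefixOf, Bool.and_eq_true]
      by_cases hc : c == hd
      · have hc' : c = hd := by simpa using hc
        rw [if_pos (by simp [hc'])]
        simp only [List.length_cons] at hf
        rw [List.length_singleton, List.drop_one, List.tail_cons, ih t (acc+1) (by omega)]
        simp [hc']
        omega
      · have hc' : ¬ hd = c := by simpa using fun h => hc (by simp [h])
        rw [if_neg (by simp; intro h; exact hc (by simp [h]))]
        simp only [List.length_cons] at hf
        rw [ih t acc (by omega)]
        simp [List.count_cons, hc']

-- counting a one-character pattern is List.count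
theorem pv_count_single (cs : List Char) (c : Char) :
    PySem.Chars.count cs [c] = cs.count c := by
  unfold PySem.Chars.count
  simp [pv_count_go_single]

-- bisect of a natural offset = count of '\n' among the first m characters
theorem pv_bisect_count (cs : List Char) (m : Nat) :
    PySem.List.bisectLeft (pvNlOf cs) ((m : Int)) = (cs.take m).count '\n' := by
  unfold pvNlOf
  rw [pv_bisectLeft_eq_countP _ _ (pv_nl_sorted cs 0)]
  have := pv_countP_nl cs 0 m
  simpa using this

-- B's bisect of a nonnegative offset = A's count of '\n' in the prefix slice
theorem pv_line_eq' (J : String) (e : Int) (he : 0 ≤ e) :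
    (PySem.List.bisectLeft (pvNlOf J.toList) e : Int)
      = (PySem.Str.count (PySem.Str.slice J none (some e)) "\n" : Int) := by
  rw [PySem.Str.count_eq]
  have hsl : (PySem.Str.slice J none (some e)).toList = PySem.List.slice J.toList none (some e) := by
    simp [PySem.Str.toList_slice]
  rw [hsl]
  have hnl : ("\n" : String).toList = ['\n'] := by decide
  rw [hnl, pv_count_single, PySem.List.slice_to _ he]
  have h2 := pv_bisect_count J.toList e.toNat
  conv_lhs => rw [show e = ((e.toNat : Nat) : Int) from by omega]
  exact_mod_cast h2

theorem pv_bisect_zero (cs : List Char) : PySem.List.bisectLeft (pvNlOf cs) (0 : Int) = 0 := by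
  have h := pv_bisect_count cs 0
  simpa using h

-- splitlines produces newline-free pieces
theorem pv_go_no_nl (isB : Char → Bool) (hB : isB '\n' = true) :
    ∀ (n : Nat) (s : List Char), s.length ≤ n → ∀ (cur : List Char) (acc : List (List Char)),
      '\n' ∉ cur → (∀ l ∈ acc, '\n' ∉ l) →
      ∀ l ∈ PySem.Chars.splitlines.go isB s cur acc, '\n' ∉ l := by
  intro n
  induction n with
  | zero =>
    intro s hs cur acc hcur hacc l hl
    have hsnil : s = [] := List.eq_nil_of_length_eq_zero (by omega)
    subst hsnil
    rw [PySem.Chars.splitlines.go.eq_def] at hl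
    split at hl
    · split at hl
      · exact hacc l (List.mem_reverse.1 hl)
      · rcases List.mem_cons.1 (List.mem_reverse.1 hl) with h | h
        · subst h; simpa using hcur
        · exact hacc l h
    · simp at *
    · simp at *
  | succ m ih =>
    intro s hs cur acc hcur hacc l hl
    rw [PySem.Chars.splitlines.go.eq_def] at hl
    split at hl
    · split at hl
      · exact hacc l (List.mem_reverse.1 hl)
      · rcases List.mem_cons.1 (List.mem_reverse.1 hl) with h | h
        · subst h; simpa using hcur
        · exact hacc l h
    · rename_i rest
      refine ih rest (by simp at hs ⊢; omega) [] _ (by simp) ?_ l hl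
      intro l' hl'
      rcases List.mem_cons.1 hl' with h | h
      · subst h; simpa using hcur
      · exact hacc l' h
    · rename_i c rest _
      split at hl
      · refine ih rest (by simp at hs ⊢; omega) [] _ (by simp) ?_ l hl
        intro l' hl'
        rcases List.mem_cons.1 hl' with h | h
        · subst h; simpa using hcur
        · exact hacc l' h
      · rename_i hb
        refine ih rest (by simp at hs ⊢; omega) (c :: cur) _ ?_ hacc l hl
        intro hmem
        rcases List.mem_cons.1 hmem with h | h
        · exact hb (by rw [← h]; exact hB)
        · exact hcur h

theorem pv_splitlines_no_nl (s : String) (l : String) (hl : l ∈ PySem.Str.splitlines s) :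
    '\n' ∉ l.toList := by
  have h1 : l.toList ∈ (PySem.Str.splitlines s).map String.toList := List.mem_map_of_mem hl
  rw [PySem.Str.splitlines_map_toList] at h1
  unfold PySem.Chars.splitlines at h1
  exact pv_go_no_nl _ (by decide) s.toList.length s.toList le_rfl [] [] (by simp) (by simp) _ h1

-- intercalate, peeled one element
theorem pv_intercalate_cons (sep x : List Char) (zs : List (List Char)) :
    sep.intercalate (x :: zs) = if zs = [] then x else x ++ sep ++ sep.intercalate zs := by
  simp [List.intercalate]
  cases zs <;> simp [List.intersperse]

-- total newline count of the join of newline-free pieces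
theorem pv_count_join (parts : List (List Char)) (h : ∀ l ∈ parts, '\n' ∉ l) (hne : parts ≠ []) :
    (PySem.Chars.join ['\n'] parts).count '\n' = parts.length - 1 := by
  induction parts with
  | nil => simp at hne
  | cons x zs ih =>
    unfold PySem.Chars.join
    rw [pv_intercalate_cons]
    by_cases hz : zs = []
    · subst hz
      simp [List.count_eq_zero.2 (h x (by simp))]
    · rw [if_neg hz]
      have hx : x.count '\n' = 0 := List.count_eq_zero.2 (h x (by simp))
      have hzs := ih (fun l hl => h l (by simp [hl])) hz
      unfold PySem.Chars.join at hzs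
      rw [List.count_append, List.count_append, hx, hzs]
      have : zs.length ≠ 0 := fun hh => hz (List.eq_nil_of_length_eq_zero hh)
      simp [List.count_cons]
      omega

-- prefix newline counts are monotone
theorem pv_count_take_mono (l : List Char) (c : Char) (m k : Nat) (h : m ≤ k) :
    (l.take m).count c ≤ (l.take k).count c := by
  have : l.take m = (l.take k).take m := by rw [List.take_take, Nat.min_eq_left h]
  rw [this]
  exact ((l.take k).take_sublist m).count_le c

-- any prefix of the join has fewer newlines than there are lines
theorem pv_prefix_count_lt (lines : List String) (hlines : lines ≠ [])
    (hnl : ∀ l ∈ lines, '\n' ∉ l.toList) (m : Nat) :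
    ((PySem.Str.join "\n" lines).toList.take m).count '\n' < lines.length := by
  have h1 : ((PySem.Str.join "\n" lines).toList.take m).count '\n'
      ≤ (PySem.Str.join "\n" lines).toList.count '\n' :=
    ((PySem.Str.join "\n" lines).toList.take_sublist m).count_le '\n'
  have h2 : (PySem.Str.join "\n" lines).toList.count '\n' = lines.length - 1 := by
    rw [PySem.Str.toList_join]
    have hsep : ("\n" : String).toList = ['\n'] := by decide
    rw [hsep, pv_count_join (lines.map String.toList)
      (by intro l hl; rcases List.mem_map.1 hl with ⟨l', hl', rfl⟩; exact hnl l' hl')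
      (by simpa using hlines)]
    simp
  have h3 : 0 < lines.length := List.length_pos_of_ne_nil hlines
  omega

-- the lines slice taken by both programs is nonempty
theorem pv_subLines_ne (lines : List String) (Ls Le : Nat) (hLs : Ls < lines.length) (hLe : Ls ≤ Le) :
    PySem.List.slice lines (some (Ls : Int)) (some ((Le : Int) + 1)) ≠ [] := by
  intro hnil
  have hlen := congrArg List.length hnil
  rw [PySem.List.length_slice] at hlen
  rw [show ((Le : Int) + 1) = (((Le + 1 : Nat)) : Int) from by push_cast; ring] at hlen
  rw [PySem.List.clampIdx_natCast, PySem.List.clampIdx_natCast] at hlen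
  simp at hlen
  omega

-- general-step range, peeled one element
theorem pv_pyRange_nil (a b st : Int) (h : 0 < st) (hab : b ≤ a) :
    PySem.List.pyRange a b st = [] := by
  rw [PySem.List.pyRange_of_pos a b h]
  rw [if_neg (by omega)]
  simp

theorem pv_pyRange_cons (a b st : Int) (h : 0 < st) (hab : a < b) :
    PySem.List.pyRange a b st = a :: PySem.List.pyRange (a + st) b st := by
  rw [PySem.List.pyRange_of_pos a b h, PySem.List.pyRange_of_pos (a + st) b h]
  rw [if_pos hab]
  have hq : (b - a + st - 1) / st = (b - a - 1) / st + 1 := by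
    have h2 := Int.add_mul_ediv_right (b - a - 1) 1 (show st ≠ 0 by omega)
    rw [show b - a + st - 1 = b - a - 1 + 1 * st by ring, h2]
  have hq0 : 0 ≤ (b - a - 1) / st := Int.ediv_nonneg (by omega) (by omega)
  have hk : ((b - a + st - 1) / st).toNat = ((b - a - 1) / st).toNat + 1 := by omega
  rw [hk, List.range_succ_eq_map]
  simp only [List.map_cons, List.map_map]
  congr 1
  · ring
  by_cases h2 : a + st < b
  · rw [if_pos h2]
    have : b - (a + st) + st - 1 = b - a - 1 := by ring
    rw [this]
    apply List.map_congr_left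
    intro k _
    simp
    ring
  · rw [if_neg h2]
    have hle1 : (b - a - 1) / st ≤ 0 := by
      by_contra hcon
      push_neg at hcon
      have := Int.le_ediv_iff_mul_le (a := b - a - 1) (b := 1) (c := st) (by omega)
      have h3 : 1 * st ≤ b - a - 1 := ((Int.le_ediv_iff_mul_le (by omega)).1 (by omega))
      omega
    have : ((b - a - 1) / st).toNat = 0 := by omega
    rw [this]
    simp

-- A's while loop produces the common chunk list
theorem pv_ALoop_eq (lines : List String) (joined : String) (cs ov : Int)
    (hjoin : joined = PySem.Str.join "\n" lines) (hlines : lines ≠ [])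
    (hnl : ∀ l ∈ lines, '\n' ∉ l.toList) (hcs : 0 ≤ cs) :
    ∀ (n : Nat) (s : Int), (((joined.toList.length : Int)) - s).toNat = n → 0 ≤ s → ∀ acc,
      pvALoop lines joined ((joined.toList.length : Int)) cs ov s acc
        = acc ++ pvBRec lines (pvNlOf joined.toList) ((joined.toList.length : Int)) cs (cs - ov) s := by
  intro n
  induction n using Nat.strong_induction_on with
  | _ n ih =>
    intro s hn hs acc
    rw [pvALoop.eq_def, pvBRec.eq_def]
    by_cases h : s < (joined.toList.length : Int)
    · simp only [dif_pos h]
      have hN0 : (0 : Int) ≤ (joined.toList.length : Int) := Int.natCast_nonneg _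
      have he0 : 0 ≤ min (s + cs) (joined.toList.length : Int) := by omega
      -- characterise the two line numbers as prefix newline counts
      have hLe : PySem.List.bisectLeft (pvNlOf joined.toList) (min (s + cs) (joined.toList.length : Int))
          = (joined.toList.take (min (s + cs) (joined.toList.length : Int)).toNat).count '\n' := by
        have h2 := pv_bisect_count joined.toList (min (s + cs) (joined.toList.length : Int)).toNat
        rwa [show (((min (s + cs) (joined.toList.length : Int)).toNat : Nat) : Int)
          = min (s + cs) (joined.toList.length : Int) by omega] at h2
      have hLs : PySem.List.bisectLeft (pvNlOf joined.toList) s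
          = (joined.toList.take s.toNat).count '\n' := by
        have h2 := pv_bisect_count joined.toList s.toNat
        rwa [show ((s.toNat : Nat) : Int) = s by omega] at h2
      -- A's end_line equals B's
      rw [← pv_line_eq' joined _ he0]
      -- A's start_line equals B's
      have hstart : (if 0 < s then (PySem.Str.count (PySem.Str.slice joined none (some s)) "\n" : Int) + 1 else 1)
          = (PySem.List.bisectLeft (pvNlOf joined.toList) s : Int) + 1 := by
        by_cases hs0 : 0 < s
        · rw [if_pos hs0, pv_line_eq' joined s (le_of_lt hs0)]
        · have hseq : s = 0 := by omega
          subst hseq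
          rw [if_neg hs0, pv_bisect_zero]
          simp
      rw [hstart]
      -- the slice of lines is nonempty
      have hsub : PySem.List.slice lines
          (some ((PySem.List.bisectLeft (pvNlOf joined.toList) s : Int) + 1 - 1))
          (some ((PySem.List.bisectLeft (pvNlOf joined.toList) (min (s + cs) (joined.toList.length : Int)) : Int) + 1)) ≠ [] := by
        rw [show (PySem.List.bisectLeft (pvNlOf joined.toList) s : Int) + 1 - 1
          = (PySem.List.bisectLeft (pvNlOf joined.toList) s : Int) by ring]
        rw [hLs, hLe]
        apply pv_subLines_ne
        · rw [hjoin]; exact pv_prefix_count_lt lines hlines hnl _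
        · apply pv_count_take_mono
          omega
      rw [if_neg hsub]
      -- branch on the loop exit conditions
      by_cases hEN : min (s + cs) (joined.toList.length : Int) = (joined.toList.length : Int)
      · rw [if_pos hEN, if_pos (Or.inl hEN)]
        simp [pvChunkAt]
      · rw [if_neg hEN]
        by_cases hstep : cs - ov ≤ 0
        · rw [if_pos hstep, if_pos (Or.inr hstep)]
          simp [pvChunkAt]
        · rw [if_neg hstep, if_neg (by omega)]
          rw [ih (((joined.toList.length : Int) - (s + (cs - ov))).toNat) (by omega) _ rfl (by omega)]
          simp [pvChunkAt]
    · simp only [dif_neg h]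
      simp
-- B's map over the arithmetic progression of starts produces the common chunk list
theorem pv_BRange_eq (lines : List String) (nl : List Int) (N cs step : Int)
    (hstep : 0 < step) (hcs : 0 ≤ cs) (hN : cs < N) :
    ∀ (n : Nat) (s : Int), (N - s).toNat = n → 0 ≤ s →
      (s < min N (N - cs + step) ∨ N ≤ s) →
      (PySem.List.pyRange s (min N (N - cs + step)) step).map (pvChunkAt lines nl N cs)
        = pvBRec lines nl N cs step s := by
  intro n
  induction n using Nat.strong_induction_on with
  | _ n ih =>
    intro s hn hs hcase
    rw [pvBRec.eq_def]
    by_cases h : s < N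
    · have hstop : s < min N (N - cs + step) := by omega
      rw [dif_pos h, pv_pyRange_cons _ _ _ hstep hstop, List.map_cons]
      congr 1
      by_cases hend : min (s + cs) N = N ∨ step ≤ 0
      · rw [if_pos hend]
        have hsN : N ≤ s + cs := by omega
        exact List.map_eq_nil_iff.2 (pv_pyRange_nil _ _ _ hstep (by omega))
      · rw [if_neg hend]
        have hlt : s + cs < N := by omega
        exact ih ((N - (s + step)).toNat) (by omega) _ rfl (by omega) (by omega)
    · rw [dif_neg h]
      exact List.map_eq_nil_iff.2 (pv_pyRange_nil _ _ _ hstep (by omega))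

-- ===== VERDICT (by name: the statement is the Claim_ definition above) =====
theorem fixed_chunk_text_py_spec : Claim_equal_fixed_chunk_text_py := by
  intro text cs ov _ hpre
  have hpre' : 0 ≤ cs := hpre
  unfold Spec_fixed_chunk_text_py fixed_chunk_text_py fixed_chunk_text_py_alt
  simp only
  split
  · rfl
  · rename_i hlines
    have hlen : PySem.Str.len (PySem.Str.join "\n" (PySem.Str.splitlines text))
        = ((PySem.Str.join "\n" (PySem.Str.splitlines text)).toList.length : Int) := by
      simp [PySem.Str.len_eq]
    split
    · rfl
    · rename_i hNcs
      rw [hlen] at hNcs ⊢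
      rw [pv_ALoop_eq (PySem.Str.splitlines text) (PySem.Str.join "\n" (PySem.Str.splitlines text))
        cs ov rfl hlines (fun l hl => pv_splitlines_no_nl text l hl) hpre _ 0 rfl le_rfl []]
      rw [List.nil_append]
      have hN0 : (0 : Int) ≤ ((PySem.Str.join "\n" (PySem.Str.splitlines text)).toList.length : Int) :=
        Int.natCast_nonneg _
      by_cases hstep : cs - ov ≤ 0
      · rw [if_pos hstep]
        rw [pvBRec.eq_def, dif_pos (by omega), if_pos (Or.inr hstep)]
        simp
      · rw [if_neg hstep]
        have hstep' : 0 < cs - ov := by omega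
        have hNcs' : cs < ((PySem.Str.join "\n" (PySem.Str.splitlines text)).toList.length : Int) := by omega
        exact (pv_BRange_eq _ _ _ cs (cs - ov) hstep' hpre hNcs' _ 0 rfl le_rfl (by omega)).symm
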